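-- pv_equiv track=rewrite | github.com/Samantanae/TAGCAN | python_version/tag_gestion_idea.py | get_size_tag
-- ===== SOURCE A (Python) =====
-- def _verif_contain(e:str, tag_name:str, r:str) -> bool:
--     """C'est une simple sous-fonction de vérification.
--     En C, elle retourne 1 pour True, 0 pour False et un négatif en cas d'erreur.
--     le négatif est le code d'erreur.
--
--     Args:
--         e (str): _description_
--         tag_name (str): _description_
--         r (str): _description_
--
--     Returns:
--         bool: _description_
--     """
--     return (e.startswith(r) and e == r + tag_name)
--
-- def get_size_tag(gt:str, tag_name:str)->int:
--     """version évoluer du précédent chercheur de taille de tags.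
--     il permet de récupérer la taille dédier au tag sans même avoir à tout le temps spécifier la taille de celui-ci.
--
--
--     Args:
--         gt (str): gestionnaire de tags
--         tag_name (str): le nom du tag (juste le nom. pas de séparateur, pas de 'x_' avant.)
--
--     Returns:
--         int: la taille qui y est rataché.
--     """
--     tlp = gt.split(";")[1:]
--     for e in tlp:
--         if _verif_contain(e, tag_name, "1_"):
--             return 1
--         elif _verif_contain(e, tag_name, "3_"):
--             return 3
--         elif _verif_contain(e, tag_name, "4_"):
--             return 4
--         elif _verif_contain(e, tag_name, "8_"):
--             return 8
--         elif _verif_contain(e, tag_name, "16a_") or _verif_contain(e, tag_name, "16b_"):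
--             return 16
--     return -1
-- ===== SOURCE B (Python) =====
-- _SIZES = (("1_", 1), ("3_", 3), ("4_", 4), ("8_", 8), ("16a_", 16), ("16b_", 16))
--
-- def get_size_tag(gt: str, tag_name: str) -> int:
--     # Invert the scan: look up the position of each of the six possible exact
--     # tokens with list.index and keep the size of the earliest one.
--     toks = gt.split(";")[1:]
--     best_i = None
--     best_s = -1
--     for pre, size in _SIZES:
--         try:
--             i = toks.index(pre + tag_name)
--         except ValueError:
--             continue
--         if best_i is None or i < best_i:
--             best_i, best_s = i, size
--     return best_s
-- ===== Notes on version B (the rewrite author's own statement) =====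
-- stated objective: alternative
-- what changed: B inverts the scan: instead of walking the token list and testing the six prefixes against each token, it computes list.index of each of the six exact candidate tokens ('1_'+tag_name, ..., '16b_'+tag_name) and returns the size of the earliest hit (-1 if none).
import Mathlib
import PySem

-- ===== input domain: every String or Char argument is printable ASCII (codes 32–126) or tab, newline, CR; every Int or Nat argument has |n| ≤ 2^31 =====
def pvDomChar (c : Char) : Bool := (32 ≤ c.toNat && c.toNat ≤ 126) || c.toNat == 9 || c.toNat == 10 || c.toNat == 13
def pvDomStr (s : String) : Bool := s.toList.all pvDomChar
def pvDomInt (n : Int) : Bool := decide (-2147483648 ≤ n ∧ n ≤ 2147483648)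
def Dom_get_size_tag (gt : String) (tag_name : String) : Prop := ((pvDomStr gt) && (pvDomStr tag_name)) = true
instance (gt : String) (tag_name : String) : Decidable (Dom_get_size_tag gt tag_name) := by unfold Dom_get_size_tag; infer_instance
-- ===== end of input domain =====

-- B inverts A's scan: it looks up each of the six candidate tokens with list.index and keeps
-- the earliest hit (objective: alternative decomposition; same return value everywhere).

-- ===== PORT A =====
def verif_contain (e : String) (tag_name : String) (r : String) : Bool :=
  PySem.Str.startswith e r && (e == r ++ tag_name)

def get_size_tag_loop (tag_name : String) : List String → Int
  | [] => -1
  | e :: rest =>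
    if verif_contain e tag_name "1_" then 1
    else if verif_contain e tag_name "3_" then 3
    else if verif_contain e tag_name "4_" then 4
    else if verif_contain e tag_name "8_" then 8
    else if verif_contain e tag_name "16a_" || verif_contain e tag_name "16b_" then 16
    else get_size_tag_loop tag_name rest

def get_size_tag (gt : String) (tag_name : String) : Int :=
  let tlp := PySem.List.slice ((PySem.Str.split? gt ";").getD []) (some 1) none
  get_size_tag_loop tag_name tlp

-- ===== PORT B =====
def pvSizes : List (String × Int) :=
  [("1_", 1), ("3_", 3), ("4_", 4), ("8_", 8), ("16a_", 16), ("16b_", 16)]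

-- one iteration of B's loop over the six (prefix, size) pairs
def altStep (toks : List String) (tag_name : String)
    (best : Option (Nat × Int)) (ps : String × Int) : Option (Nat × Int) :=
  match PySem.List.index? toks (ps.1 ++ tag_name) with
  | none => best
  | some i =>
    match best with
    | none => some (i, ps.2)
    | some (bi, _) => if i < bi then some (i, ps.2) else best

def get_size_tag_alt (gt : String) (tag_name : String) : Int :=
  let toks := PySem.List.slice ((PySem.Str.split? gt ";").getD []) (some 1) none
  match pvSizes.foldl (altStep toks tag_name) none with
  | none => -1
  | some (_, s) => s

-- ===== PRECONDITION & SPEC =====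
def Spec_get_size_tag (gt : String) (tag_name : String) (out : Int) : Prop := out = get_size_tag_alt gt tag_name
instance (gt : String) (tag_name : String) (out : Int) : Decidable (Spec_get_size_tag gt tag_name out) := by unfold Spec_get_size_tag; infer_instance

-- ===== CLAIM (what is proved, stated in full; the proofs are below) =====
def Claim_equal_get_size_tag : Prop := ∀ (gt : String) (tag_name : String), Dom_get_size_tag gt tag_name → Spec_get_size_tag gt tag_name (get_size_tag gt tag_name)

-- ===== LEMMAS AND PROOFS =====

-- abstract version of B's fold: the candidates are (first index of the token, size)
def sel : Option (Nat × Int) → List (Option Nat × Int) → Option (Nat × Int)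
  | best, [] => best
  | best, (none, _) :: ps => sel best ps
  | best, (some i, s) :: ps =>
    sel (match best with
         | none => some (i, s)
         | some (bi, _) => if i < bi then some (i, s) else best) ps

def cands (toks : List String) (tag_name : String) : List (Option Nat × Int) :=
  pvSizes.map (fun q => (PySem.List.index? toks (q.1 ++ tag_name), q.2))

lemma foldl_altStep_eq_sel (toks : List String) (t : String) :
    ∀ (ps : List (String × Int)) (best : Option (Nat × Int)),
      ps.foldl (altStep toks t) best
        = sel best (ps.map (fun q => (PySem.List.index? toks (q.1 ++ t), q.2))) := by
  intro ps
  induction ps with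
  | nil => intro best; rfl
  | cons q ps ih =>
    intro best
    simp only [List.foldl_cons, List.map_cons, ih]
    unfold altStep
    rcases h : PySem.List.index? toks (q.1 ++ t) with _ | i
    · rfl
    · rcases best with _ | ⟨bi, bs⟩ <;> rfl

-- shifting every candidate index by one does not change which candidate is selected
lemma sel_map_bump (c : List (Option Nat × Int)) :
    ∀ best, sel (Option.map (fun p => (p.1 + 1, p.2)) best)
              (c.map (fun p => (Option.map (· + 1) p.1, p.2)))
          = Option.map (fun p => (p.1 + 1, p.2)) (sel best c) := by
  induction c with
  | nil => intro best; rfl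
  | cons p ps ih =>
    intro best
    rcases p with ⟨_ | i, s⟩
    · simpa [sel] using ih best
    · rcases best with _ | ⟨bi, bs⟩
      · simpa [sel] using ih (some (i, s))
      · by_cases hlt : i < bi
        · simp only [List.map_cons, Option.map_some, sel, if_pos hlt,
            if_pos (by omega : i + 1 < bi + 1)]
          exact ih (some (i, s))
        · simp only [List.map_cons, Option.map_some, sel, if_neg hlt,
            if_neg (by omega : ¬ i + 1 < bi + 1)]
          exact ih (some (bi, bs))

-- once a candidate at index 0 is the best, later candidates with positive indices never replace it
lemma sel_keep_zero (c : List (Option Nat × Int)) (s : Int)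
    (h : ∀ p ∈ c, ∀ i, p.1 = some i → 1 ≤ i) :
    sel (some (0, s)) c = some (0, s) := by
  induction c with
  | nil => rfl
  | cons p ps ih =>
    rcases p with ⟨_ | i, s'⟩
    · exact ih (fun p hp => h p (List.mem_cons_of_mem _ hp))
    · have hi : 1 ≤ i := h (some i, s') List.mem_cons_self i rfl
      simp only [sel, if_neg (by omega : ¬ i < 0)]
      exact ih (fun p hp => h p (List.mem_cons_of_mem _ hp))

-- a candidate at index 0 wins against any surrounding positive-index candidates
lemma sel_zero_wins (pre suf : List (Option Nat × Int)) (s : Int)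
    (hpre : ∀ p ∈ pre, ∀ i, p.1 = some i → 1 ≤ i)
    (hsuf : ∀ p ∈ suf, ∀ i, p.1 = some i → 1 ≤ i) :
    ∀ best, (best = none ∨ ∃ bi bs, best = some (bi, bs) ∧ 1 ≤ bi) →
      sel best (pre ++ (some 0, s) :: suf) = some (0, s) := by
  induction pre with
  | nil =>
    intro best hb
    rcases hb with rfl | ⟨bi, bs, rfl, hbi⟩
    · simpa [sel] using sel_keep_zero suf s hsuf
    · simp only [List.nil_append, sel, if_pos (by omega : 0 < bi)]
      exact sel_keep_zero suf s hsuf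
  | cons p ps ih =>
    intro best hb
    rcases p with ⟨_ | i, s'⟩
    · exact ih (fun p hp => hpre p (List.mem_cons_of_mem _ hp)) best hb
    · have hi : 1 ≤ i := hpre (some i, s') List.mem_cons_self i rfl
      rcases hb with rfl | ⟨bi, bs, rfl, hbi⟩
      · exact ih (fun p hp => hpre p (List.mem_cons_of_mem _ hp)) (some (i, s'))
          (Or.inr ⟨i, s', rfl, hi⟩)
      · by_cases hlt : i < bi
        · simp only [List.cons_append, sel, if_pos hlt]
          exact ih (fun p hp => hpre p (List.mem_cons_of_mem _ hp)) (some (i, s'))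
            (Or.inr ⟨i, s', rfl, hi⟩)
        · simp only [List.cons_append, sel, if_neg hlt]
          exact ih (fun p hp => hpre p (List.mem_cons_of_mem _ hp)) (some (bi, bs))
            (Or.inr ⟨bi, bs, rfl, hbi⟩)

-- the six candidate tokens are pairwise distinct
lemma targets_ne (r r' t : String) (hr : r.toList ≠ r'.toList) :
    r ++ t ≠ r' ++ t := by
  intro h
  apply hr
  have h2 : r.toList ++ t.toList = r'.toList ++ t.toList := by
    simpa using congrArg String.toList h
  exact List.append_cancel_right h2

lemma verif_eq (e t r : String) : verif_contain e t r = (e == r ++ t) := by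
  unfold verif_contain
  rcases h : (e == r ++ t) with _ | _
  · simp
  · have he : e = r ++ t := by simpa using h
    subst he
    simp only [PySem.Str.startswith_eq, String.toList_append, Bool.and_eq_true]
    exact ⟨(PySem.Chars.startswith_iff _ _).2 (List.prefix_append _ _), by simp⟩

def bOut (toks : List String) (t : String) : Int :=
  match sel none (cands toks t) with
  | none => -1
  | some (_, s) => s

lemma cands_cons_of_ne (e : String) (rest : List String) (t : String)
    (h : ∀ q ∈ pvSizes, e ≠ q.1 ++ t) :
    cands (e :: rest) t
      = (cands rest t).map (fun p => (Option.map (· + 1) p.1, p.2)) := by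
  unfold cands
  rw [List.map_map]
  apply List.map_congr_left
  intro q hq
  rw [PySem.List.index?_cons_of_ne rest (h q hq)]
  rfl

-- when the head token is the candidate of entry q, B's selection picks (0, q.2)
lemma bOut_match (rest : List String) (t : String) (pre suf : List (String × Int))
    (q : String × Int) (hsplit : pvSizes = pre ++ q :: suf)
    (hne : ∀ q' ∈ pre ++ suf, q'.1.toList ≠ q.1.toList) :
    bOut ((q.1 ++ t) :: rest) t = q.2 := by
  have hpos : ∀ (q' : String × Int), q'.1.toList ≠ q.1.toList →
      ∀ i, PySem.List.index? ((q.1 ++ t) :: rest) (q'.1 ++ t) = some i → 1 ≤ i := by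
    intro q' hq' i hi
    rw [PySem.List.index?_cons_of_ne rest
      (targets_ne q.1 q'.1 t (fun hh => hq' hh.symm))] at hi
    rcases h2 : PySem.List.index? rest (q'.1 ++ t) with _ | j <;> rw [h2] at hi
    · simp at hi
    · simp at hi; omega
  have hmap : ∀ (l : List (String × Int)), (∀ q' ∈ l, q'.1.toList ≠ q.1.toList) →
      ∀ p ∈ l.map (fun q' => (PySem.List.index? ((q.1 ++ t) :: rest) (q'.1 ++ t), q'.2)),
        ∀ i, p.1 = some i → 1 ≤ i := by
    intro l hl p hp i hi
    obtain ⟨q', hq', rfl⟩ := List.mem_map.1 hp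
    exact hpos q' (hl q' hq') i hi
  unfold bOut cands
  rw [hsplit, List.map_append, List.map_cons,
      PySem.List.index?_cons_self]
  rw [sel_zero_wins _ _ q.2
    (hmap pre (fun q' h => hne q' (List.mem_append_left _ h)))
    (hmap suf (fun q' h => hne q' (List.mem_append_right _ h)))
    none (Or.inl rfl)]

lemma loop_eq_bOut (t : String) : ∀ toks, get_size_tag_loop t toks = bOut toks t := by
  intro toks
  induction toks with
  | nil => simp [get_size_tag_loop, bOut, cands, pvSizes, PySem.List.index?, sel]
  | cons e rest ih =>
    by_cases hmem : ∃ q ∈ pvSizes, e = q.1 ++ t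
    · -- e is one of the six candidate tokens: A stops here with that size,
      -- and B's selection returns index 0 with the same size.
      obtain ⟨q, hq, rfl⟩ := hmem
      fin_cases hq
      · rw [bOut_match rest t [] [("3_", 3), ("4_", 4), ("8_", 8), ("16a_", 16), ("16b_", 16)]
          ("1_", 1) rfl (by decide)]
        simp [get_size_tag_loop, verif_eq]
      · rw [bOut_match rest t [("1_", 1)] [("4_", 4), ("8_", 8), ("16a_", 16), ("16b_", 16)]
          ("3_", 3) rfl (by decide)]
        have n1 := targets_ne "3_" "1_" t (by decide)
        simp [get_size_tag_loop, verif_eq, n1]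
      · rw [bOut_match rest t [("1_", 1), ("3_", 3)] [("8_", 8), ("16a_", 16), ("16b_", 16)]
          ("4_", 4) rfl (by decide)]
        have n1 := targets_ne "4_" "1_" t (by decide)
        have n3 := targets_ne "4_" "3_" t (by decide)
        simp [get_size_tag_loop, verif_eq, n1, n3]
      · rw [bOut_match rest t [("1_", 1), ("3_", 3), ("4_", 4)] [("16a_", 16), ("16b_", 16)]
          ("8_", 8) rfl (by decide)]
        have n1 := targets_ne "8_" "1_" t (by decide)
        have n3 := targets_ne "8_" "3_" t (by decide)
        have n4 := targets_ne "8_" "4_" t (by decide)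
        simp [get_size_tag_loop, verif_eq, n1, n3, n4]
      · rw [bOut_match rest t [("1_", 1), ("3_", 3), ("4_", 4), ("8_", 8)] [("16b_", 16)]
          ("16a_", 16) rfl (by decide)]
        have n1 := targets_ne "16a_" "1_" t (by decide)
        have n3 := targets_ne "16a_" "3_" t (by decide)
        have n4 := targets_ne "16a_" "4_" t (by decide)
        have n8 := targets_ne "16a_" "8_" t (by decide)
        simp [get_size_tag_loop, verif_eq, n1, n3, n4, n8]
      · rw [bOut_match rest t [("1_", 1), ("3_", 3), ("4_", 4), ("8_", 8), ("16a_", 16)] []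
          ("16b_", 16) rfl (by decide)]
        have n1 := targets_ne "16b_" "1_" t (by decide)
        have n3 := targets_ne "16b_" "3_" t (by decide)
        have n4 := targets_ne "16b_" "4_" t (by decide)
        have n8 := targets_ne "16b_" "8_" t (by decide)
        simp [get_size_tag_loop, verif_eq, n1, n3, n4, n8]
    · push Not at hmem
      have hA : get_size_tag_loop t (e :: rest) = get_size_tag_loop t rest := by
        have h1 := hmem ("1_", (1 : Int)) (by simp [pvSizes])
        have h3 := hmem ("3_", (3 : Int)) (by simp [pvSizes])
        have h4 := hmem ("4_", (4 : Int)) (by simp [pvSizes])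
        have h8 := hmem ("8_", (8 : Int)) (by simp [pvSizes])
        have h16a := hmem ("16a_", (16 : Int)) (by simp [pvSizes])
        have h16b := hmem ("16b_", (16 : Int)) (by simp [pvSizes])
        simp [get_size_tag_loop, verif_eq, h1, h3, h4, h8, h16a, h16b]
      rw [hA, ih]
      unfold bOut
      rw [cands_cons_of_ne e rest t hmem]
      have hb := sel_map_bump (cands rest t) none
      simp only [Option.map_none] at hb
      rw [hb]
      rcases sel none (cands rest t) with _ | ⟨i, s⟩ <;> simp

-- ===== VERDICT (by name: the statement is the Claim_ definition above) =====
theorem get_size_tag_spec : Claim_equal_get_size_tag := by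
  intro gt t _
  unfold Spec_get_size_tag get_size_tag get_size_tag_alt
  dsimp only
  rw [foldl_altStep_eq_sel, loop_eq_bOut]
  rfl
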